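-- pv_equiv track=rewrite | github.com/904566722/mycmd-py | mycmd/modules/flow/commands/todo_archive.py | _generate_archive_content
-- ===== SOURCE A (Python) =====
-- def _generate_archive_content(tasks: list, start_date: str, end_date: str) -> str:
--     """生成归档文件内容"""
--     content = [
--         "---------------------------------------------",
--         "format1. 状态-开始时间-结束时间-分类-项目-名称",
--         "---------------------------------------------\n"
--     ]
--
--     # 格式1：按状态列出所有任务
--     for task in tasks:
--         task_line = f"{task['status']}-{task.get('start_date', 'unknown')}-{task['end_date']}-{task['category']}-{task['project']}-{task['name']}"
--         content.append(task_line)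
--
--     content.extend([
--         "\n\n---------------------------------------------",
--         "format2. (把已完成和进行中的任务按照分类罗列)",
--         "---------------------------------------------"
--     ])
--
--     # 格式2：按分类组织任务
--     categories = {}
--     for task in tasks:
--         if task['status'] != '已取消':
--             category = task['category']
--             if category not in categories:
--                 categories[category] = []
--             categories[category].append(f"{task['project']}-{task['name']}")
--
--     for category in sorted(categories.keys()):
--         content.append(f"\n{category}:")
--         for i, task in enumerate(categories[category], 1):
--             content.append(f"{i}. {task}")
--
--     return '\n'.join(content)
-- ===== SOURCE B (Python) =====
-- def _generate_archive_content(tasks: list, start_date: str, end_date: str) -> str: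
--     """生成归档文件内容 (sort-free regrouping: sorted distinct categories + per-category filter pass)"""
--     header1 = [
--         "---------------------------------------------",
--         "format1. 状态-开始时间-结束时间-分类-项目-名称",
--         "---------------------------------------------\n",
--     ]
--     lines1 = [
--         f"{t['status']}-{t.get('start_date', 'unknown')}-{t['end_date']}-{t['category']}-{t['project']}-{t['name']}"
--         for t in tasks
--     ]
--     header2 = [
--         "\n\n---------------------------------------------",
--         "format2. (把已完成和进行中的任务按照分类罗列)",
--         "---------------------------------------------",
--     ]
--     active = [t for t in tasks if t['status'] != '已取消']
--     lines2 = []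
--     for cat in sorted({t['category'] for t in active}):
--         lines2.append(f"\n{cat}:")
--         lines2.extend(
--             f"{i}. {t['project']}-{t['name']}"
--             for i, t in enumerate((t for t in active if t['category'] == cat), 1)
--         )
--     return '\n'.join(header1 + lines1 + header2 + lines2)
-- ===== Notes on version B (the rewrite author's own statement) =====
-- stated objective: alternative
-- what changed: Replaces A's incrementally-built dict of category->lines (then a walk over its sorted keys) with a dict-free traversal: filter the active tasks once, sort their distinct categories, and re-scan the filtered list per category; format-1 becomes a comprehension. Pre_ excludes only tasks missing one of the required keys, on which A raises KeyError.
import Mathlib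
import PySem

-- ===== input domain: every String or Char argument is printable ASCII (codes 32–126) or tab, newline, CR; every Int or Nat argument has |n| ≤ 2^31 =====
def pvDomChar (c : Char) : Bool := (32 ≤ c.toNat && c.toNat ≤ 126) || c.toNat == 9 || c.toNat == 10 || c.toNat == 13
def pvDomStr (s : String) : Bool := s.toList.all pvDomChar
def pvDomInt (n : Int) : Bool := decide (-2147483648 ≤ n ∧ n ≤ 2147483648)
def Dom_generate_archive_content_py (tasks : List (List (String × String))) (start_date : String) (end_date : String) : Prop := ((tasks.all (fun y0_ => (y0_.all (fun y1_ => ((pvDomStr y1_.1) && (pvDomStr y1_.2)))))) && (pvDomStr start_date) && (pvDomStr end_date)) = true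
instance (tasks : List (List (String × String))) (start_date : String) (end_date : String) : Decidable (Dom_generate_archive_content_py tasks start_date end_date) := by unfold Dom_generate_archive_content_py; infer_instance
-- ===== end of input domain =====

-- B regroups by filtering the active tasks once and re-scanning them per sorted distinct category,
-- instead of A's incrementally-accumulated dict walked over its sorted keys (alternative structure, same result).

-- shared helpers: both Pythons contain the identical lookup / f-string expressions
-- task[k]  (total form; Pre_ guarantees the key is present, so the "" default is never used)
def pvGet (t : List (String × String)) (k : String) : String := (PySem.Dict.mk t).getD k ""
-- task.get(k, d)
def pvGetDef (t : List (String × String)) (k d : String) : String := (PySem.Dict.mk t).getD k d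
-- f"{status}-{start_date|unknown}-{end_date}-{category}-{project}-{name}"
def pvFmt1 (t : List (String × String)) : String :=
  pvGet t "status" ++ "-" ++ pvGetDef t "start_date" "unknown" ++ "-" ++ pvGet t "end_date"
    ++ "-" ++ pvGet t "category" ++ "-" ++ pvGet t "project" ++ "-" ++ pvGet t "name"
-- f"{project}-{name}"
def pvProj (t : List (String × String)) : String := pvGet t "project" ++ "-" ++ pvGet t "name"

-- ===== PORT A =====
def generate_archive_content_py (tasks : List (List (String × String))) (start_date : String) (end_date : String) : String :=
  let content : List String :=
    ["---------------------------------------------",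
     "format1. 状态-开始时间-结束时间-分类-项目-名称",
     "---------------------------------------------\n"]
  let content := tasks.foldl (fun acc task => acc ++ [pvFmt1 task]) content
  let content := content ++
    ["\n\n---------------------------------------------",
     "format2. (把已完成和进行中的任务按照分类罗列)",
     "---------------------------------------------"]
  let categories : PySem.Dict String (List String) :=
    tasks.foldl (fun d task =>
      if pvGet task "status" ≠ "已取消" then
        let category := pvGet task "category"
        let d := if d.contains category then d else d.insert category []
        d.modify category [] (fun l => l ++ [pvProj task])
      else d) PySem.Dict.empty
  let content := (PySem.List.sorted categories.keys (fun x => x) false).foldl (fun acc category =>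
      let acc := acc ++ ["\n" ++ category ++ ":"]
      (PySem.List.enumerate (categories.getD category []) 1).foldl
        (fun acc p => acc ++ [PySem.Int.toStr p.1 ++ ". " ++ p.2]) acc) content
  PySem.Str.join "\n" content

-- ===== PORT B =====
def generate_archive_content_py_alt (tasks : List (List (String × String))) (start_date : String) (end_date : String) : String :=
  let header1 : List String :=
    ["---------------------------------------------",
     "format1. 状态-开始时间-结束时间-分类-项目-名称",
     "---------------------------------------------\n"]
  let lines1 := tasks.map pvFmt1
  let header2 : List String :=
    ["\n\n---------------------------------------------",
     "format2. (把已完成和进行中的任务按照分类罗列)",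
     "---------------------------------------------"]
  let active := tasks.filter (fun t => decide (pvGet t "status" ≠ "已取消"))
  let lines2 := (PySem.List.sorted (PySem.Set.ofList (active.map (fun t => pvGet t "category"))) (fun x => x) false).foldl
      (fun acc cat => acc ++ (("\n" ++ cat ++ ":") ::
        (PySem.List.enumerate (active.filter (fun t => pvGet t "category" == cat)) 1).map
          (fun p => PySem.Int.toStr p.1 ++ ". " ++ pvProj p.2))) []
  PySem.Str.join "\n" (header1 ++ lines1 ++ header2 ++ lines2)

-- ===== PRECONDITION & SPEC =====
-- Pre_ excludes exactly the task dicts missing one of the keys status/end_date/category/project/name,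
-- on which the Python A raises KeyError.
def Pre_generate_archive_content_py (tasks : List (List (String × String))) (start_date : String) (end_date : String) : Prop :=
  (tasks.all (fun t => ["status", "end_date", "category", "project", "name"].all
      (fun k => t.any (fun p => p.1 == k)))) = true
instance (tasks : List (List (String × String))) (start_date : String) (end_date : String) : Decidable (Pre_generate_archive_content_py tasks start_date end_date) := by unfold Pre_generate_archive_content_py; infer_instance

def pvWitness_generate_archive_content_py : (List (List (String × String))) × String × String :=
  ([[("status", "done"), ("end_date", "2024-01-02"), ("category", "work"), ("project", "p1"), ("name", "n1")],
    [("status", "done"), ("start_date", "2024-01-01"), ("end_date", "2024-01-03"), ("category", "home"), ("project", "p2"), ("name", "n2")]],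
   "2024-01-01", "2024-01-31")

def Spec_generate_archive_content_py (tasks : List (List (String × String))) (start_date : String) (end_date : String) (out : String) : Prop := out = generate_archive_content_py_alt tasks start_date end_date
instance (tasks : List (List (String × String))) (start_date : String) (end_date : String) (out : String) : Decidable (Spec_generate_archive_content_py tasks start_date end_date out) := by unfold Spec_generate_archive_content_py; infer_instance

-- ===== CLAIM (what is proved, stated in full; the proofs are below) =====
def Claim_equal_generate_archive_content_py : Prop := ∀ (tasks : List (List (String × String))) (start_date : String) (end_date : String), Dom_generate_archive_content_py tasks start_date end_date → Pre_generate_archive_content_py tasks start_date end_date → Spec_generate_archive_content_py tasks start_date end_date (generate_archive_content_py tasks start_date end_date)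

-- ===== LEMMAS AND PROOFS =====

theorem pv_ensure_absorb (d : PySem.Dict String (List String)) (c x : String) :
    PySem.Dict.modify (if d.contains c then d else d.insert c []) c [] (fun l => l ++ [x])
      = d.modify c [] (fun l => l ++ [x]) := by
  by_cases h : d.contains c
  · simp [h]
  · simp only [h]
    simp [PySem.Dict.modify, PySem.Dict.getD_insert_self, PySem.Dict.insert_insert_self,
      PySem.Dict.getD_of_not_contains, h]

theorem pv_enumerate_map {α β : Type} (f : α → β) (l : List α) (s : Int) :
    PySem.List.enumerate (l.map f) s = (PySem.List.enumerate l s).map (fun p => (p.1, f p.2)) := by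
  induction l generalizing s with
  | nil => simp [PySem.List.enumerate_nil]
  | cons a t ih => simp [PySem.List.enumerate_cons, ih]

theorem pv_dict_getD (l : List (List (String × String))) (c : String) :
    (l.foldl (fun (d : PySem.Dict String (List String)) t => d.modify (pvGet t "category") [] (fun v => v ++ [pvProj t])) PySem.Dict.empty).getD c []
      = (l.filter (fun t => pvGet t "category" == c)).map pvProj := by
  have h := List.foldl_map (f := fun t => ((pvGet t "category" : String), (pvProj t : String)))
      (g := fun (d : PySem.Dict String (List String)) p => d.modify p.1 [] (fun v => v ++ [p.2]))
      (l := l) (init := PySem.Dict.empty)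
  simp only at h
  rw [← h, PySem.Dict.getD_foldl_modify_append]
  simp [List.filter_map, List.map_map, Function.comp_def]

theorem pv_dict_keys (l : List (List (String × String))) :
    (l.foldl (fun (d : PySem.Dict String (List String)) t => d.modify (pvGet t "category") [] (fun v => v ++ [pvProj t])) PySem.Dict.empty).keys
      = PySem.Set.ofList (l.map (fun t => pvGet t "category")) := by
  rw [PySem.Dict.keys_foldl_modify_key]
  simp [PySem.Set.update, PySem.Set.ofList_eq_foldl]

theorem pv_main (tasks : List (List (String × String))) (s e : String) :
    generate_archive_content_py tasks s e = generate_archive_content_py_alt tasks s e := by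
  unfold generate_archive_content_py generate_archive_content_py_alt
  simp only
  apply congrArg (PySem.Str.join "\n")
  rw [PySem.List.foldl_append_singleton_eq_map]
  have hstep : (fun (d : PySem.Dict String (List String)) task =>
      if pvGet task "status" ≠ "已取消" then
        PySem.Dict.modify (if d.contains (pvGet task "category") then d else d.insert (pvGet task "category") [])
          (pvGet task "category") [] (fun l => l ++ [pvProj task])
      else d)
      = (fun (d : PySem.Dict String (List String)) t =>
          if pvGet t "status" ≠ "已取消" then d.modify (pvGet t "category") [] (fun v => v ++ [pvProj t]) else d) := by
    funext d t
    by_cases h : pvGet t "status" ≠ "已取消"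
    · simp only [if_pos h]
      exact pv_ensure_absorb d (pvGet t "category") (pvProj t)
    · simp only [if_neg h]
  rw [hstep, PySem.List.foldl_ite_eq_foldl_filter, pv_dict_keys]
  have hfun : (fun (acc : List String) category =>
      (PySem.List.enumerate
          (((tasks.filter (fun t => decide (pvGet t "status" ≠ "已取消"))).foldl
            (fun (d : PySem.Dict String (List String)) t => d.modify (pvGet t "category") [] (fun v => v ++ [pvProj t])) PySem.Dict.empty).getD category []) 1).foldl
        (fun acc p => acc ++ [PySem.Int.toStr p.1 ++ ". " ++ p.2]) (acc ++ ["\n" ++ category ++ ":"]))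
      = (fun acc cat => acc ++ (("\n" ++ cat ++ ":") ::
          (PySem.List.enumerate ((tasks.filter (fun t => decide (pvGet t "status" ≠ "已取消"))).filter (fun t => pvGet t "category" == cat)) 1).map
            (fun p => PySem.Int.toStr p.1 ++ ". " ++ pvProj p.2))) := by
    funext acc c
    rw [pv_dict_getD, pv_enumerate_map, PySem.List.foldl_append_singleton_eq_map]
    simp [List.map_map, Function.comp_def]
  rw [hfun, PySem.List.foldl_append_eq_flatMap, PySem.List.foldl_append_eq_flatMap]
  simp

-- ===== VERDICT (by name: the statement is the Claim_ definition above) =====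
theorem generate_archive_content_py_spec : Claim_equal_generate_archive_content_py := by
  intro tasks s e _ _
  exact pv_main tasks s e
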